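-- pv_equiv track=rewrite | github.com/Melv1nS/CS313E_Projects | Assignments/Assignment 1/word.py | down_right_diagonal_to_string
-- ===== SOURCE A (Python) =====
-- def down_right_diagonal_to_string(word_grid):
--
--     diag_list = []
--     diag_str = ""
--
--     row = 0
--     col = 0
--     row_counter = 0
--     col_counter = 0
--
--     for rows in word_grid:
--         col_counter = 0
--         for cols in rows:
--             row = row_counter
--             col = col_counter
--             while row < len(word_grid) and col < len(word_grid[row]):
--
--                 letter = word_grid[row][col]
--                 diag_str += letter
--
--                 row += 1
--                 col += 1
--
--             diag_list.append(diag_str)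
--             diag_str = ""
--
--             col_counter += 1
--         row_counter += 1
--
--     return diag_list
-- ===== SOURCE B (Python) =====
-- def down_right_diagonal_to_string(word_grid):
--     # Bottom-up memo table: each cell's diagonal string reuses the one below-right.
--     n = len(word_grid)
--     diag = [None] * n
--     next_row = []
--     for r in range(n - 1, -1, -1):
--         row = word_grid[r]
--         m = len(next_row)
--         cur = [row[c] + (next_row[c + 1] if c + 1 < m else "")
--                for c in range(len(row))]
--         diag[r] = cur
--         next_row = cur
--     return [s for cur in diag for s in cur]
-- ===== Notes on version B (the rewrite author's own statement) =====
-- stated objective: faster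
-- what changed: B builds a bottom-up memo table of diagonal suffixes (each cell's string = cell + already-computed string below-right) and flattens it row-major, instead of A's per-character while-loop re-walk of the whole diagonal from every start cell.
import Mathlib
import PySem

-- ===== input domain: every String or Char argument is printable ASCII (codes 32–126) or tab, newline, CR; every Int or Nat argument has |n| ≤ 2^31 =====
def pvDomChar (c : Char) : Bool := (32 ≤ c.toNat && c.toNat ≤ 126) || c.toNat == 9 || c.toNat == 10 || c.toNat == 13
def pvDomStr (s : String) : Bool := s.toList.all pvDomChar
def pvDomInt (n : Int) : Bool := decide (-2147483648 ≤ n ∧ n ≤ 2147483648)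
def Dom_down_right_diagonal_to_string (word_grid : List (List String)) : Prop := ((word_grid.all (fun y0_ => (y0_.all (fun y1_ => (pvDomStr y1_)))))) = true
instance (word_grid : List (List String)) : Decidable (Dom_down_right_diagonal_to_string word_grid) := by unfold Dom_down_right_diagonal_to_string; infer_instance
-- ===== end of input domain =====

-- B replaces A's re-walk of every diagonal from scratch by a bottom-up memo table
-- (each cell's diagonal string = cell ++ already-computed below-right suffix); alternative decomposition.

-- ===== PORT A =====
-- A's inner while loop: walk down-right from (row, col), concatenating letters.
def walkA (g : List (List String)) (row col : Nat) : String :=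
  if h : row < g.length ∧ col < (g.getD row []).length then
    (g.getD row []).getD col "" ++ walkA g (row + 1) (col + 1)
  else ""
termination_by g.length - row
decreasing_by omega

def down_right_diagonal_to_string (word_grid : List (List String)) : List String :=
  (List.foldl (fun (acc : List String × Nat) (rows : List String) =>
      let inner := List.foldl (fun (a : List String × Nat) (_ : String) =>
          (a.1 ++ [walkA word_grid acc.2 a.2], a.2 + 1)) (acc.1, 0) rows
      (inner.1, acc.2 + 1))
    ([], 0) word_grid).1

-- ===== PORT B =====
-- one memo row: entry c is row[c] ++ (next[c+1] if in range else "")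
def rowB (c : Nat) (row : List String) (next : List String) : List String :=
  match row with
  | [] => []
  | s :: rest => (s ++ next.getD (c + 1) "") :: rowB (c + 1) rest next

-- the memo table, filled from the bottom row upward
def buildB : List (List String) → List (List String)
  | [] => []
  | row :: rest =>
      let tbl := buildB rest
      rowB 0 row (tbl.headD []) :: tbl

def down_right_diagonal_to_string_alt (word_grid : List (List String)) : List String :=
  (buildB word_grid).flatten

-- ===== PRECONDITION & SPEC =====
def Spec_down_right_diagonal_to_string (word_grid : List (List String)) (out : List String) : Prop := out = down_right_diagonal_to_string_alt word_grid
instance (word_grid : List (List String)) (out : List String) : Decidable (Spec_down_right_diagonal_to_string word_grid out) := by unfold Spec_down_right_diagonal_to_string; infer_instance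

-- ===== CLAIM (what is proved, stated in full; the proofs are below) =====
def Claim_equal_down_right_diagonal_to_string : Prop := ∀ (word_grid : List (List String)), Dom_down_right_diagonal_to_string word_grid → Spec_down_right_diagonal_to_string word_grid (down_right_diagonal_to_string word_grid)

-- ===== LEMMAS AND PROOFS =====

-- structural version of A's diagonal walk, on a suffix of the grid
def walkA' : List (List String) → Nat → String
  | [], _ => ""
  | row :: rest, c => if c < row.length then row.getD c "" ++ walkA' rest (c + 1) else ""

-- canonical result: for each suffix, one string per cell of its head row
def canon : List (List String) → List String
  | [] => []
  | row :: rest => (List.range row.length).map (fun c => walkA' (row :: rest) c) ++ canon rest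

-- canonical result with absolute row indices, for A's side
def canonA (g : List (List String)) : Nat → List (List String) → List String
  | _, [] => []
  | r0, row :: rest => (List.range row.length).map (fun c => walkA g r0 c) ++ canonA g (r0 + 1) rest

theorem walkA_eq_walkA' (g : List (List String)) :
    ∀ (n row col : Nat), g.length - row ≤ n → walkA g row col = walkA' (g.drop row) col := by
  intro n
  induction n with
  | zero =>
    intro row col h
    rw [walkA]
    have hle : g.length ≤ row := by omega
    rw [List.drop_of_length_le hle]
    rw [dif_neg (by omega)]
    rfl
  | succ n ih =>
    intro row col h
    rw [walkA]
    by_cases hrow : row < g.length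
    · rw [List.drop_eq_getElem_cons hrow]
      have hget : g.getD row [] = g[row] := List.getD_eq_getElem g [] hrow
      by_cases hcol : col < (g.getD row []).length
      · rw [dif_pos ⟨hrow, hcol⟩]
        rw [walkA']
        rw [if_pos (by rw [← hget]; exact hcol)]
        rw [ih (row + 1) (col + 1) (by omega)]
        rw [hget]
      · rw [dif_neg (by tauto)]
        rw [walkA']
        rw [if_neg (by rw [← hget]; exact hcol)]
    · rw [dif_neg (by tauto)]
      rw [List.drop_of_length_le (by omega)]
      rfl

theorem inner_fold (f : Nat → String) :
    ∀ (row : List String) (acc : List String) (c0 : Nat),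
      List.foldl (fun (a : List String × Nat) (_ : String) => (a.1 ++ [f a.2], a.2 + 1)) (acc, c0) row
        = (acc ++ (List.range row.length).map (fun i => f (c0 + i)), c0 + row.length) := by
  intro row
  induction row with
  | nil => intro acc c0; simp [List.foldl]
  | cons s rest ih =>
    intro acc c0
    simp only [List.foldl_cons]
    rw [ih (acc ++ [f c0]) (c0 + 1)]
    simp only [List.length_cons, List.range_succ_eq_map, List.map_cons, List.map_map,
      Prod.mk.injEq]
    constructor
    · rw [List.append_assoc]
      simp only [List.cons_append, List.nil_append, Nat.add_zero]
      congr 1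
      congr 1
      apply List.map_congr_left
      intro i _
      simp only [Function.comp]
      congr 1
      omega
    · omega

theorem outer_fold (g : List (List String)) :
    ∀ (rows : List (List String)) (acc : List String) (r0 : Nat),
      (List.foldl (fun (acc : List String × Nat) (row : List String) =>
          let inner := List.foldl (fun (a : List String × Nat) (_ : String) =>
              (a.1 ++ [walkA g acc.2 a.2], a.2 + 1)) (acc.1, 0) row
          (inner.1, acc.2 + 1)) (acc, r0) rows).1
        = acc ++ canonA g r0 rows := by
  intro rows
  induction rows with
  | nil => intro acc r0; simp [List.foldl, canonA]
  | cons row rest ih =>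
    intro acc r0
    simp only [List.foldl_cons]
    rw [inner_fold (fun c => walkA g r0 c) row acc 0]
    rw [ih]
    rw [canonA]
    simp [List.append_assoc]

theorem canonA_eq_canon (g : List (List String)) :
    ∀ (rows : List (List String)) (r : Nat), rows = g.drop r → canonA g r rows = canon rows := by
  intro rows
  induction rows with
  | nil => intro r _; rfl
  | cons row rest ih =>
    intro r h
    rw [canonA, canon]
    have hrest : rest = g.drop (r + 1) := by
      simpa [List.tail_drop] using congrArg List.tail h
    rw [ih (r + 1) hrest]
    congr 1
    apply List.map_congr_left
    intro c _
    rw [walkA_eq_walkA' g g.length r c (by omega), ← h]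

theorem rowB_getD (next : List String) :
    ∀ (row : List String) (k c : Nat),
      (rowB k row next).getD c ""
        = if c < row.length then row.getD c "" ++ next.getD (k + c + 1) "" else "" := by
  intro row
  induction row with
  | nil => intro k c; simp [rowB]
  | cons s rest ih =>
    intro k c
    rw [rowB]
    cases c with
    | zero => simp
    | succ c =>
      simp only [List.getD_cons_succ, List.length_cons]
      rw [ih (k + 1) c]
      have : k + 1 + c + 1 = k + (c + 1) + 1 := by omega
      rw [this]
      simp only [Nat.succ_lt_succ_iff]

theorem buildB_head_getD :
    ∀ (g : List (List String)) (c : Nat),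
      ((buildB g).headD []).getD c "" = walkA' g c := by
  intro g
  induction g with
  | nil => intro c; rfl
  | cons row rest ih =>
    intro c
    rw [buildB]
    simp only [List.headD_cons]
    rw [rowB_getD _ row 0 c, walkA']
    split_ifs with h
    · simp only [Nat.zero_add]
      rw [ih (c + 1)]
    · rfl

theorem rowB_eq_map (next : List String) :
    ∀ (row : List String) (k : Nat),
      rowB k row next = (List.range row.length).map (fun i => row.getD i "" ++ next.getD (k + i + 1) "") := by
  intro row
  induction row with
  | nil => intro k; rfl
  | cons s rest ih =>
    intro k
    rw [rowB, ih (k + 1)]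
    simp only [List.length_cons, List.range_succ_eq_map, List.map_cons, List.map_map,
      List.getD_cons_zero, Nat.add_zero]
    congr 1
    apply List.map_congr_left
    intro i _
    simp only [Function.comp, List.getD_cons_succ]
    congr 2
    omega

theorem buildB_flatten_eq_canon :
    ∀ (g : List (List String)), (buildB g).flatten = canon g := by
  intro g
  induction g with
  | nil => rfl
  | cons row rest ih =>
    rw [buildB, canon]
    simp only [List.flatten_cons]
    rw [ih]
    congr 1
    rw [rowB_eq_map]
    apply List.map_congr_left
    intro c hc
    rw [walkA']
    rw [if_pos (List.mem_range.mp hc)]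
    simp only [Nat.zero_add]
    rw [buildB_head_getD rest (c + 1)]

-- ===== VERDICT (by name: the statement is the Claim_ definition above) =====
theorem down_right_diagonal_to_string_spec : Claim_equal_down_right_diagonal_to_string := by
  intro g _
  unfold Spec_down_right_diagonal_to_string down_right_diagonal_to_string down_right_diagonal_to_string_alt
  rw [outer_fold g g [] 0]
  rw [canonA_eq_canon g g 0 (by simp)]
  rw [buildB_flatten_eq_canon]
  simp
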